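-- pv_equiv track=rewrite | github.com/starkjeffrey/naga-monorepo-v1-final | apps/backend/scripts/development/analyze_scholarships_comprehensive.py | classify_scholarship_type
-- ===== SOURCE A (Python) =====
-- def classify_scholarship_type(note):
--     """Classify scholarship type based on note content."""
--     if not note:
--         return "Unknown"
--
--     note_lower = note.lower()
--
--     if any(word in note_lower for word in ["alumni", "alumna", "alum"]):
--         return "Alumni Scholarship"
--     elif "staff" in note_lower or "phann" in note_lower:
--         return "Staff Scholarship"
--     elif "merit" in note_lower:
--         return "Merit Scholarship"
--     elif any(word in note_lower for word in ["scholar", "sch"]):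
--         return "General Scholarship"
--     else:
--         return "Unknown Scholarship"
-- ===== SOURCE B (Python) =====
-- _KEYWORDS = [("alum", 0), ("staff", 1), ("phann", 1), ("merit", 2), ("sch", 3)]
-- _LABELS = [
--     "Alumni Scholarship",
--     "Staff Scholarship",
--     "Merit Scholarship",
--     "General Scholarship",
--     "Unknown Scholarship",
-- ]
--
--
-- def classify_scholarship_type(note):
--     # Single left-to-right scan of the lowered note: at each position record the
--     # lowest priority of any keyword starting there, then index a label table.
--     # Redundant keywords are dropped ("alumni"/"alumna" contain "alum",
--     # "scholar" contains "sch"), which preserves the original priorities.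
--     if not note:
--         return "Unknown"
--     s = note.lower()
--     best = 4
--     for i in range(len(s)):
--         for kw, p in _KEYWORDS:
--             if p < best and s.startswith(kw, i):
--                 best = p
--     return _LABELS[best]
-- ===== Notes on version B (the rewrite author's own statement) =====
-- stated objective: alternative
-- what changed: Replaced the ordered substring-membership branch chain by a single positional scan of the lowered note that records the minimum priority of any keyword starting at each index (redundant keywords 'alumni'/'alumna'/'scholar' eliminated since they contain 'alum'/'sch') and then indexes a label table.
import Mathlib
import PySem

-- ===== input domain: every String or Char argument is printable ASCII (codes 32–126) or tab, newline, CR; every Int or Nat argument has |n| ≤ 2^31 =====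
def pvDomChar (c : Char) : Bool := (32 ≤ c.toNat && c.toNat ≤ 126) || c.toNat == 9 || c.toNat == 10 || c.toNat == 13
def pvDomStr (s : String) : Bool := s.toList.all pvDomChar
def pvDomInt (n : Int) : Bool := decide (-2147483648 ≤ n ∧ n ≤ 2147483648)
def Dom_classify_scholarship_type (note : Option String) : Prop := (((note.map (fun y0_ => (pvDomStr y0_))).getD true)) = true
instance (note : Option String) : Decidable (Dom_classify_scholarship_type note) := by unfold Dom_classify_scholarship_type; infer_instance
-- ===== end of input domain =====

-- B replaces A's ordered substring-membership branch chain by a single positional scan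
-- recording the minimum-priority keyword match, then a label-table lookup (objective: alternative).

-- ===== PORT A =====
def classify_scholarship_type (note : Option String) : String :=
  match note with
  | none => "Unknown"
  | some s =>
    if s = "" then "Unknown"
    else
      let note_lower := PySem.Str.lower s
      if ["alumni", "alumna", "alum"].any (fun w => PySem.Str.isIn w note_lower) then
        "Alumni Scholarship"
      else if PySem.Str.isIn "staff" note_lower || PySem.Str.isIn "phann" note_lower then
        "Staff Scholarship"
      else if PySem.Str.isIn "merit" note_lower then
        "Merit Scholarship"
      else if ["scholar", "sch"].any (fun w => PySem.Str.isIn w note_lower) then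
        "General Scholarship"
      else
        "Unknown Scholarship"

-- ===== PORT B =====
def pvKeywords : List (List Char × Nat) :=
  [("alum".toList, 0), ("staff".toList, 1), ("phann".toList, 1),
   ("merit".toList, 2), ("sch".toList, 3)]

def pvLabels : List String :=
  ["Alumni Scholarship", "Staff Scholarship", "Merit Scholarship",
   "General Scholarship", "Unknown Scholarship"]

-- inner loop of Source B: try every keyword at position i, keeping the best (lowest) priority
def pvStep (cs : List Char) (best : Nat) (i : Nat) : Nat :=
  pvKeywords.foldl
    (fun b kp => if kp.2 < b ∧ kp.1.isPrefixOf (cs.drop i) then kp.2 else b) best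

def classify_scholarship_type_alt (note : Option String) : String :=
  match note with
  | none => "Unknown"
  | some s =>
    if s = "" then "Unknown"
    else
      let cs := (PySem.Str.lower s).toList
      let best := (List.range cs.length).foldl (pvStep cs) 4
      -- s.startswith(kw, i) for 0 ≤ i < len(s) is exactly kw.isPrefixOf (cs.drop i);
      -- _LABELS[best]: best ≤ 4 always, so this getD never takes the default
      pvLabels.getD best "Unknown Scholarship"

-- ===== PRECONDITION & SPEC =====
def Spec_classify_scholarship_type (note : Option String) (out : String) : Prop := out = classify_scholarship_type_alt note
instance (note : Option String) (out : String) : Decidable (Spec_classify_scholarship_type note out) := by unfold Spec_classify_scholarship_type; infer_instance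

-- ===== CLAIM (what is proved, stated in full; the proofs are below) =====
def Claim_equal_classify_scholarship_type : Prop := ∀ (note : Option String), Dom_classify_scholarship_type note → Spec_classify_scholarship_type note (classify_scholarship_type note)

-- ===== LEMMAS AND PROOFS =====

-- the inner fold (over any keyword list) never increases the accumulator
theorem innerfold_le (cs : List Char) (i : Nat) (kps : List (List Char × Nat)) (b : Nat) :
    kps.foldl (fun b kp => if kp.2 < b ∧ kp.1.isPrefixOf (cs.drop i) then kp.2 else b) b ≤ b := by
  induction kps generalizing b with
  | nil => simp
  | cons k t ih =>
    refine le_trans (ih _) ?_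
    dsimp only
    split_ifs with h
    · exact Nat.le_of_lt h.1
    · exact Nat.le_refl b

-- if some listed keyword matches at i, the inner fold ends ≤ its priority
theorem innerfold_ub (cs : List Char) (i : Nat) {kw : List Char} {p : Nat}
    (kps : List (List Char × Nat)) (b : Nat) (hm : (kw, p) ∈ kps)
    (hpre : kw.isPrefixOf (cs.drop i) = true) :
    kps.foldl (fun b kp => if kp.2 < b ∧ kp.1.isPrefixOf (cs.drop i) then kp.2 else b) b ≤ p := by
  induction kps generalizing b with
  | nil => cases hm
  | cons k t ih =>
    rcases List.mem_cons.1 hm with rfl | hm'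
    · refine le_trans (innerfold_le cs i t _) ?_
      dsimp only
      split_ifs with h
      · exact Nat.le_refl p
      · exact Nat.le_of_not_lt (fun hlt => h ⟨hlt, hpre⟩)
    · exact ih _ hm'

-- if no listed keyword of priority ≤ p matches at i, the inner fold stays above p
theorem innerfold_lb (cs : List Char) (i : Nat) (kps : List (List Char × Nat)) (b p : Nat)
    (hb : p < b)
    (h : ∀ kp ∈ kps, kp.2 ≤ p → kp.1.isPrefixOf (cs.drop i) = false) :
    p < kps.foldl (fun b kp => if kp.2 < b ∧ kp.1.isPrefixOf (cs.drop i) then kp.2 else b) b := by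
  induction kps generalizing b with
  | nil => exact hb
  | cons k t ih =>
    refine ih _ ?_ (fun kp hk => h kp (List.mem_cons_of_mem _ hk))
    dsimp only
    split_ifs with hc
    · by_contra hkp
      push_neg at hkp
      have := h k (List.mem_cons_self) (by omega)
      rw [this] at hc
      exact absurd hc.2 (by simp)
    · exact hb

theorem foldl_pvStep_le (cs : List Char) (l : List Nat) (b : Nat) :
    l.foldl (pvStep cs) b ≤ b := by
  induction l generalizing b with
  | nil => exact Nat.le_refl b
  | cons i t ih => exact le_trans (ih (pvStep cs b i)) (innerfold_le cs i pvKeywords b)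

theorem foldl_pvStep_ub (cs : List Char) (l : List Nat) (b : Nat) {i : Nat}
    {kw : List Char} {p : Nat} (hm : (kw, p) ∈ pvKeywords)
    (hpre : kw.isPrefixOf (cs.drop i) = true) (hi : i ∈ l) :
    l.foldl (pvStep cs) b ≤ p := by
  induction l generalizing b with
  | nil => cases hi
  | cons j t ih =>
    rcases List.mem_cons.1 hi with rfl | hi'
    · exact le_trans (foldl_pvStep_le cs t _) (innerfold_ub cs i pvKeywords b hm hpre)
    · exact ih _ hi'

theorem foldl_pvStep_lb (cs : List Char) (l : List Nat) (b p : Nat) (hb : p < b)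
    (h : ∀ i ∈ l, ∀ kp ∈ pvKeywords, kp.2 ≤ p → kp.1.isPrefixOf (cs.drop i) = false) :
    p < l.foldl (pvStep cs) b := by
  induction l generalizing b with
  | nil => exact hb
  | cons j t ih =>
    refine ih _ (innerfold_lb cs j pvKeywords b p hb (h j (List.mem_cons_self)))
      (fun i hi => h i (List.mem_cons_of_mem _ hi))

theorem occurs_of_isIn {cs kw : List Char} (hkw : kw ≠ [])
    (h : PySem.Chars.isIn kw cs = true) :
    ∃ i ∈ List.range cs.length, kw.isPrefixOf (cs.drop i) = true := by
  obtain ⟨j, hp⟩ := (PySem.Chars.exists_prefix_drop_iff_isIn kw cs).2 h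
  refine ⟨j, List.mem_range.2 ?_, List.isPrefixOf_iff_prefix.2 hp⟩
  by_contra hj
  push_neg at hj
  rw [List.drop_eq_nil_of_le hj] at hp
  exact hkw (List.prefix_nil.1 hp)

theorem isIn_of_prefix_drop {cs kw : List Char} {i : Nat}
    (h : kw.isPrefixOf (cs.drop i) = true) : PySem.Chars.isIn kw cs = true :=
  (PySem.Chars.exists_prefix_drop_iff_isIn kw cs).1 ⟨i, List.isPrefixOf_iff_prefix.1 h⟩

theorem isIn_mono {sub sub' cs : List Char} (h : sub <:+: sub')
    (h2 : PySem.Chars.isIn sub' cs = true) : PySem.Chars.isIn sub cs = true := by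
  rw [PySem.Chars.isIn_iff_infix] at h2 ⊢
  exact h.trans h2

theorem scan_le (cs : List Char) {kw : List Char} {p : Nat}
    (hm : (kw, p) ∈ pvKeywords) (hkw : kw ≠ [])
    (h : PySem.Chars.isIn kw cs = true) :
    (List.range cs.length).foldl (pvStep cs) 4 ≤ p := by
  obtain ⟨i, hi, hp⟩ := occurs_of_isIn hkw h
  exact foldl_pvStep_ub cs _ 4 hm hp hi

theorem lt_scan (cs : List Char) (p : Nat) (hp : p < 4)
    (h : ∀ kw q, (kw, q) ∈ pvKeywords → q ≤ p → PySem.Chars.isIn kw cs = false) :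
    p < (List.range cs.length).foldl (pvStep cs) 4 := by
  refine foldl_pvStep_lb cs _ 4 p hp (fun i _ kp hm hq => ?_)
  by_contra hpre
  rw [Bool.not_eq_false] at hpre
  have h2 := isIn_of_prefix_drop hpre
  rw [h kp.1 kp.2 hm hq] at h2
  exact Bool.false_ne_true h2

-- the scan computes exactly the priority of A's first matching branch
theorem scan_eq (cs : List Char) :
    (List.range cs.length).foldl (pvStep cs) 4 =
      if PySem.Chars.isIn "alum".toList cs then 0
      else if PySem.Chars.isIn "staff".toList cs || PySem.Chars.isIn "phann".toList cs then 1
      else if PySem.Chars.isIn "merit".toList cs then 2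
      else if PySem.Chars.isIn "sch".toList cs then 3
      else 4 := by
  split_ifs with h0 h1 h2 h3
  · exact Nat.le_zero.1 (scan_le cs (by simp [pvKeywords]) (by decide) h0)
  · have hA : PySem.Chars.isIn "alum".toList cs = false := Bool.eq_false_iff.2 h0
    have hub : (List.range cs.length).foldl (pvStep cs) 4 ≤ 1 := by
      rcases Bool.or_eq_true_iff.1 h1 with hs | hp
      · exact scan_le cs (by simp [pvKeywords]) (by decide) hs
      · exact scan_le cs (by simp [pvKeywords]) (by decide) hp
    have hlb : 0 < (List.range cs.length).foldl (pvStep cs) 4 := by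
      refine lt_scan cs 0 (by decide) (fun kw q hm hq => ?_)
      simp only [pvKeywords, List.mem_cons, List.not_mem_nil, or_false, Prod.mk.injEq] at hm
      rcases hm with ⟨hk, hq'⟩ | ⟨hk, hq'⟩ | ⟨hk, hq'⟩ | ⟨hk, hq'⟩ | ⟨hk, hq'⟩ <;> subst hk <;>
        first | exact hA | omega
    omega
  · have hA : PySem.Chars.isIn "alum".toList cs = false := Bool.eq_false_iff.2 h0
    have hS : PySem.Chars.isIn "staff".toList cs = false := by
      rcases Bool.or_eq_false_iff.1 (Bool.eq_false_iff.2 h1) with ⟨a, _⟩; exact a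
    have hP : PySem.Chars.isIn "phann".toList cs = false := by
      rcases Bool.or_eq_false_iff.1 (Bool.eq_false_iff.2 h1) with ⟨_, a⟩; exact a
    have hub := scan_le cs (kw := "merit".toList) (p := 2) (by simp [pvKeywords]) (by decide) h2
    have hlb : 1 < (List.range cs.length).foldl (pvStep cs) 4 := by
      refine lt_scan cs 1 (by decide) (fun kw q hm hq => ?_)
      simp only [pvKeywords, List.mem_cons, List.not_mem_nil, or_false, Prod.mk.injEq] at hm
      rcases hm with ⟨hk, hq'⟩ | ⟨hk, hq'⟩ | ⟨hk, hq'⟩ | ⟨hk, hq'⟩ | ⟨hk, hq'⟩ <;> subst hk <;>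
        first | exact hA | exact hS | exact hP | omega
    omega
  · have hA : PySem.Chars.isIn "alum".toList cs = false := Bool.eq_false_iff.2 h0
    have hS : PySem.Chars.isIn "staff".toList cs = false := by
      rcases Bool.or_eq_false_iff.1 (Bool.eq_false_iff.2 h1) with ⟨a, _⟩; exact a
    have hP : PySem.Chars.isIn "phann".toList cs = false := by
      rcases Bool.or_eq_false_iff.1 (Bool.eq_false_iff.2 h1) with ⟨_, a⟩; exact a
    have hM : PySem.Chars.isIn "merit".toList cs = false := Bool.eq_false_iff.2 h2
    have hub := scan_le cs (kw := "sch".toList) (p := 3) (by simp [pvKeywords]) (by decide) h3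
    have hlb : 2 < (List.range cs.length).foldl (pvStep cs) 4 := by
      refine lt_scan cs 2 (by decide) (fun kw q hm hq => ?_)
      simp only [pvKeywords, List.mem_cons, List.not_mem_nil, or_false, Prod.mk.injEq] at hm
      rcases hm with ⟨hk, hq'⟩ | ⟨hk, hq'⟩ | ⟨hk, hq'⟩ | ⟨hk, hq'⟩ | ⟨hk, hq'⟩ <;> subst hk <;>
        first | exact hA | exact hS | exact hP | exact hM | omega
    omega
  · have hA : PySem.Chars.isIn "alum".toList cs = false := Bool.eq_false_iff.2 h0
    have hS : PySem.Chars.isIn "staff".toList cs = false := by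
      rcases Bool.or_eq_false_iff.1 (Bool.eq_false_iff.2 h1) with ⟨a, _⟩; exact a
    have hP : PySem.Chars.isIn "phann".toList cs = false := by
      rcases Bool.or_eq_false_iff.1 (Bool.eq_false_iff.2 h1) with ⟨_, a⟩; exact a
    have hM : PySem.Chars.isIn "merit".toList cs = false := Bool.eq_false_iff.2 h2
    have hC : PySem.Chars.isIn "sch".toList cs = false := Bool.eq_false_iff.2 h3
    have hub := foldl_pvStep_le cs (List.range cs.length) 4
    have hlb : 3 < (List.range cs.length).foldl (pvStep cs) 4 := by
      refine lt_scan cs 3 (by decide) (fun kw q hm hq => ?_)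
      simp only [pvKeywords, List.mem_cons, List.not_mem_nil, or_false, Prod.mk.injEq] at hm
      rcases hm with ⟨hk, hq'⟩ | ⟨hk, hq'⟩ | ⟨hk, hq'⟩ | ⟨hk, hq'⟩ | ⟨hk, hq'⟩ <;> subst hk <;>
        first | exact hA | exact hS | exact hP | exact hM | exact hC
    omega

-- ===== VERDICT (by name: the statement is the Claim_ definition above) =====
theorem classify_scholarship_type_spec : Claim_equal_classify_scholarship_type := by
  intro note _
  unfold Spec_classify_scholarship_type classify_scholarship_type classify_scholarship_type_alt
  cases note with
  | none => rfl
  | some s =>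
    by_cases hs : s = ""
    · simp [hs]
    · simp only [hs, if_false, scan_eq, PySem.Str.isIn_eq, PySem.Str.toList_lower]
      cases hA : PySem.Chars.isIn ['a','l','u','m'] (PySem.Chars.lower s.toList) with
      | true => simp [hA, pvLabels]
      | false =>
        have hni : PySem.Chars.isIn ['a','l','u','m','n','i'] (PySem.Chars.lower s.toList) = false := by
          rw [Bool.eq_false_iff]; intro h'
          rw [isIn_mono (by decide) h'] at hA; cases hA
        have hna : PySem.Chars.isIn ['a','l','u','m','n','a'] (PySem.Chars.lower s.toList) = false := by
          rw [Bool.eq_false_iff]; intro h'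
          rw [isIn_mono (by decide) h'] at hA; cases hA
        cases hS : PySem.Chars.isIn ['s','t','a','f','f'] (PySem.Chars.lower s.toList) with
        | true => simp [hA, hni, hna, hS, pvLabels]
        | false =>
          cases hP : PySem.Chars.isIn ['p','h','a','n','n'] (PySem.Chars.lower s.toList) with
          | true => simp [hA, hni, hna, hS, hP, pvLabels]
          | false =>
            cases hM : PySem.Chars.isIn ['m','e','r','i','t'] (PySem.Chars.lower s.toList) with
            | true => simp [hA, hni, hna, hS, hP, hM, pvLabels]
            | false =>
              cases hC : PySem.Chars.isIn ['s','c','h'] (PySem.Chars.lower s.toList) with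
              | true =>
                simp [hA, hni, hna, hS, hP, hM, hC, pvLabels]
              | false =>
                have hsc : PySem.Chars.isIn ['s','c','h','o','l','a','r'] (PySem.Chars.lower s.toList) = false := by
                  rw [Bool.eq_false_iff]; intro h'
                  rw [isIn_mono (by decide) h'] at hC; cases hC
                simp [hA, hni, hna, hS, hP, hM, hC, hsc, pvLabels]
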